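-- pv_equiv track=rewrite | github.com/aryaman-boop/Fashion_recommender | test_enhanced_text.py | enhance_modification_text
-- ===== SOURCE A (Python) =====
-- def enhance_modification_text(text):
--     """Enhance modification text to be more specific for better matching"""
--     text_lower = text.lower()
--     enhanced_text = text
--
--     # Handle sleeve length descriptions
--     if any(word in text_lower for word in ["long sleeve", "long-sleeve", "longsleeve", "long sleeved", "long-sleeved", "long sleeves"]):
--         enhanced_text += " with long sleeves extending to wrists, full sleeve coverage"
--     elif any(word in text_lower for word in ["short sleeve", "short-sleeve", "shortsleeve", "short sleeved", "short-sleeved", "short sleeves"]):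
--         enhanced_text += " with short sleeves above elbows, partial sleeve coverage"
--     elif any(word in text_lower for word in ["sleeveless", "no sleeves", "tank top", "spaghetti straps"]):
--         enhanced_text += " without sleeves, sleeveless design, no sleeve coverage"
--
--     # Handle neckline descriptions
--     if any(word in text_lower for word in ["v-neck", "v neck", "vneck"]):
--         enhanced_text += " with v-shaped neckline"
--     elif any(word in text_lower for word in ["crew neck", "crewneck", "round neck"]):
--         enhanced_text += " with round crew neck"
--     elif any(word in text_lower for word in ["scoop neck", "scoopneck"]):
--         enhanced_text += " with wide scoop neckline"
--
--     # Handle fit descriptions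
--     if any(word in text_lower for word in ["loose", "baggy", "oversized"]):
--         enhanced_text += " loose fitting, relaxed fit"
--     elif any(word in text_lower for word in ["tight", "fitted", "form-fitting"]):
--         enhanced_text += " tight fitting, form-fitting"
--
--     # Handle style descriptions
--     if any(word in text_lower for word in ["casual", "everyday"]):
--         enhanced_text += " casual style, everyday wear"
--     elif any(word in text_lower for word in ["formal", "business", "professional"]):
--         enhanced_text += " formal style, professional look"
--
--     return enhanced_text
-- ===== SOURCE B (Python) =====
-- # One flat rule table; scanned BACK-TO-FRONT with a dict keyed by group,
-- # so overwriting yields the highest-priority matching suffix per group.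
-- RULES = [
--     (0, ("long sleeve", "long-sleeve", "longsleeve", "long sleeved", "long-sleeved", "long sleeves"),
--      " with long sleeves extending to wrists, full sleeve coverage"),
--     (0, ("short sleeve", "short-sleeve", "shortsleeve", "short sleeved", "short-sleeved", "short sleeves"),
--      " with short sleeves above elbows, partial sleeve coverage"),
--     (0, ("sleeveless", "no sleeves", "tank top", "spaghetti straps"),
--      " without sleeves, sleeveless design, no sleeve coverage"),
--     (1, ("v-neck", "v neck", "vneck"), " with v-shaped neckline"),
--     (1, ("crew neck", "crewneck", "round neck"), " with round crew neck"),
--     (1, ("scoop neck", "scoopneck"), " with wide scoop neckline"),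
--     (2, ("loose", "baggy", "oversized"), " loose fitting, relaxed fit"),
--     (2, ("tight", "fitted", "form-fitting"), " tight fitting, form-fitting"),
--     (3, ("casual", "everyday"), " casual style, everyday wear"),
--     (3, ("formal", "business", "professional"), " formal style, professional look"),
-- ]
--
--
-- def enhance_modification_text(text):
--     """Enhance modification text to be more specific for better matching"""
--     text_lower = text.lower()
--     best = {}
--     for group, keywords, suffix in reversed(RULES):
--         if any(k in text_lower for k in keywords):
--             best[group] = suffix
--     return text + "".join(best.get(g, "") for g in (0, 1, 2, 3))
-- ===== Notes on version B (the rewrite author's own statement) =====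
-- stated objective: alternative
-- what changed: Replaces A's four first-match if/elif chains by a back-to-front scan of one flat rule table that overwrites a dict keyed by group (so the highest-priority match per group survives), then joins the per-group suffixes.
import Mathlib
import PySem

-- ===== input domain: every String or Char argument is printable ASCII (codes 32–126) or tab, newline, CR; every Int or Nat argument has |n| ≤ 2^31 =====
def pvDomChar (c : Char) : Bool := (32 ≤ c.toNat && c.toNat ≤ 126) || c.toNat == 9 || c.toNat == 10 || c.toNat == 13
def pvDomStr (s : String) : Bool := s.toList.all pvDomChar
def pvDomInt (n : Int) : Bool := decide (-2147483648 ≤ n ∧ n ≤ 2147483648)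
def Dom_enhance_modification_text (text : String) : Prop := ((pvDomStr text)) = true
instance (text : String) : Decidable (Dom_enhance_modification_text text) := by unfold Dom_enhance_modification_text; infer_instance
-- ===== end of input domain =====

-- B replaces A's four first-match if/elif chains by a back-to-front scan of one flat
-- rule table into an overwriting dict keyed by group; objective: alternative.

-- ===== PORT A =====
-- literal transliteration of A's if/elif chains
def enhance_modification_text (text : String) : String :=
  let text_lower := PySem.Str.lower text
  let enhanced_text := text
  let enhanced_text :=
    if (["long sleeve", "long-sleeve", "longsleeve", "long sleeved", "long-sleeved", "long sleeves"]).any (fun w => PySem.Str.isIn w text_lower) then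
      enhanced_text ++ " with long sleeves extending to wrists, full sleeve coverage"
    else if (["short sleeve", "short-sleeve", "shortsleeve", "short sleeved", "short-sleeved", "short sleeves"]).any (fun w => PySem.Str.isIn w text_lower) then
      enhanced_text ++ " with short sleeves above elbows, partial sleeve coverage"
    else if (["sleeveless", "no sleeves", "tank top", "spaghetti straps"]).any (fun w => PySem.Str.isIn w text_lower) then
      enhanced_text ++ " without sleeves, sleeveless design, no sleeve coverage"
    else enhanced_text
  let enhanced_text :=
    if (["v-neck", "v neck", "vneck"]).any (fun w => PySem.Str.isIn w text_lower) then
      enhanced_text ++ " with v-shaped neckline"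
    else if (["crew neck", "crewneck", "round neck"]).any (fun w => PySem.Str.isIn w text_lower) then
      enhanced_text ++ " with round crew neck"
    else if (["scoop neck", "scoopneck"]).any (fun w => PySem.Str.isIn w text_lower) then
      enhanced_text ++ " with wide scoop neckline"
    else enhanced_text
  let enhanced_text :=
    if (["loose", "baggy", "oversized"]).any (fun w => PySem.Str.isIn w text_lower) then
      enhanced_text ++ " loose fitting, relaxed fit"
    else if (["tight", "fitted", "form-fitting"]).any (fun w => PySem.Str.isIn w text_lower) then
      enhanced_text ++ " tight fitting, form-fitting"
    else enhanced_text
  let enhanced_text :=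
    if (["casual", "everyday"]).any (fun w => PySem.Str.isIn w text_lower) then
      enhanced_text ++ " casual style, everyday wear"
    else if (["formal", "business", "professional"]).any (fun w => PySem.Str.isIn w text_lower) then
      enhanced_text ++ " formal style, professional look"
    else enhanced_text
  enhanced_text

-- ===== PORT B =====
-- the flat module-level rule table RULES of Source B: (group, keywords, suffix)
def pvRules : List (Int × List String × String) :=
  [ (0, (["long sleeve", "long-sleeve", "longsleeve", "long sleeved", "long-sleeved", "long sleeves"],
         " with long sleeves extending to wrists, full sleeve coverage")),
    (0, (["short sleeve", "short-sleeve", "shortsleeve", "short sleeved", "short-sleeved", "short sleeves"],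
         " with short sleeves above elbows, partial sleeve coverage")),
    (0, (["sleeveless", "no sleeves", "tank top", "spaghetti straps"],
         " without sleeves, sleeveless design, no sleeve coverage")),
    (1, (["v-neck", "v neck", "vneck"], " with v-shaped neckline")),
    (1, (["crew neck", "crewneck", "round neck"], " with round crew neck")),
    (1, (["scoop neck", "scoopneck"], " with wide scoop neckline")),
    (2, (["loose", "baggy", "oversized"], " loose fitting, relaxed fit")),
    (2, (["tight", "fitted", "form-fitting"], " tight fitting, form-fitting")),
    (3, (["casual", "everyday"], " casual style, everyday wear")),
    (3, (["formal", "business", "professional"], " formal style, professional look")) ]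

-- for group, keywords, suffix in reversed(RULES): if any(...): best[group] = suffix
def enhance_modification_text_alt (text : String) : String :=
  let text_lower := PySem.Str.lower text
  let best : PySem.Dict Int String :=
    pvRules.reverse.foldl
      (fun best r =>
        if r.2.1.any (fun k => PySem.Str.isIn k text_lower) then best.insert r.1 r.2.2
        else best)
      PySem.Dict.empty
  text ++ String.join ([(0 : Int), 1, 2, 3].map (fun g => best.getD g ""))

-- ===== PRECONDITION & SPEC =====
def Spec_enhance_modification_text (text : String) (out : String) : Prop := out = enhance_modification_text_alt text
instance (text : String) (out : String) : Decidable (Spec_enhance_modification_text text out) := by unfold Spec_enhance_modification_text; infer_instance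

-- ===== CLAIM (what is proved, stated in full; the proofs are below) =====
def Claim_equal_enhance_modification_text : Prop := ∀ (text : String), Dom_enhance_modification_text text → Spec_enhance_modification_text text (enhance_modification_text text)

-- ===== LEMMAS AND PROOFS =====

-- a conditional insert seen through getD: affects only its own key
theorem pv_step_getD (d : PySem.Dict Int String) (b : Prop) [Decidable b] (k g : Int) (s v : String) :
    ((if b then d.insert k s else d)).getD g v
      = if g = k then (if b then s else d.getD g v) else d.getD g v := by
  by_cases hb : b <;> by_cases h : g = k <;> simp [PySem.Dict.getD_insert, h, hb]

-- appending to a common prefix commutes out of an if (bottom-up through an elif chain)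
theorem pv_chain_cons (c : Prop) [Decidable c] (e s t : String) :
    (if c then e ++ s else e ++ t) = e ++ (if c then s else t) := by
  split_ifs <;> rfl

theorem pv_chain_last (c : Prop) [Decidable c] (e s : String) :
    (if c then e ++ s else e) = e ++ (if c then s else "") := by
  split_ifs <;> simp

-- ===== VERDICT (by name: the statement is the Claim_ definition above) =====
theorem enhance_modification_text_spec : Claim_equal_enhance_modification_text := by
  intro text _
  unfold Spec_enhance_modification_text enhance_modification_text enhance_modification_text_alt
  simp only [pvRules, List.reverse, List.reverseAux, List.foldl, List.map, String.join,
    List.any_cons, List.any_nil, Bool.or_eq_true, Bool.false_eq_true, or_false,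
    pv_step_getD, PySem.Dict.getD_empty]
  simp only [Int.reduceEq, reduceIte]
  simp only [pv_chain_last, pv_chain_cons, String.append_assoc, String.empty_append]
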